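-- pv_equiv track=rewrite | github.com/dubu777/Algorithm | 프로그래머스/2/250136. ［PCCP 기출문제］ 2번 ／ 석유 시추/［PCCP 기출문제］ 2번 ／ 석유 시추.py | solution
-- ===== SOURCE A (Python) =====
-- def solution(land):
--
--
--     def find_oil(sxy):
--         from collections import deque
--         cnt = 1
--         q = deque()
--         q.append((sxy))
--         col = set()
--         while q:
--             x, y = q.pop()
--             col.add(y)
--             for dx, dy in ((1, 0), (-1, 0), (0, 1), (0, -1)):
--                 nx = dx + x
--                 ny = dy + y
--                 if 0<= nx < r and 0<= ny < c and land[nx][ny] == 1 and v[nx][ny] == 0: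
--                     v[nx][ny] = 1
--                     q.append((nx, ny))
--                     cnt += 1
--         return cnt, col
--
--
--     r = len(land)
--     c = len(land[0])
--     v = [[0] * c for _ in range(r)]
--     oil_lst = [0] * c
--     for i in range(r):
--         for j in range(c):
--             if v[i][j] == 0 and land[i][j] == 1:
--                 v[i][j] = 1
--                 cnt_o, col = find_oil((i, j))
--                 for o in col:
--                     oil_lst[o] += cnt_o
--
--
--
--     return max(oil_lst)
-- ===== SOURCE B (Python) =====
-- def solution(land):
--     r = len(land)
--     c = len(land[0])
--
--     def component(si, sj):
--         # frontier-set saturation: expand by whole levels, no stack/queue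
--         comp = {(si, sj)}
--         frontier = {(si, sj)}
--         while frontier:
--             new = set()
--             for (x, y) in frontier:
--                 for (nx, ny) in ((x + 1, y), (x - 1, y), (x, y + 1), (x, y - 1)):
--                     if 0 <= nx < r and 0 <= ny < c and land[nx][ny] == 1 and (nx, ny) not in comp:
--                         new.add((nx, ny))
--             comp |= new
--             frontier = new
--         return comp
--
--     visited = set()
--     oil = [0] * c
--     for i in range(r):
--         for j in range(c):
--             if land[i][j] == 1 and (i, j) not in visited:
--                 comp = component(i, j)
--                 visited |= comp
--                 size = len(comp)
--                 for y in {p[1] for p in comp}: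
--                     oil[y] += size
--     return max(oil)
-- ===== Notes on version B (the rewrite author's own statement) =====
-- stated objective: alternative
-- what changed: A flood-fills each component with an explicit DFS stack (deque, pop from the right) while mutating a visited matrix and counting pushes; B computes each component by frontier-set saturation (repeatedly adding the whole frontier's unseen 1-neighbours as a set, no stack/queue), keeps visited as a set of cells, and derives the component size and its column set from the finished component.
import Mathlib
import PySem

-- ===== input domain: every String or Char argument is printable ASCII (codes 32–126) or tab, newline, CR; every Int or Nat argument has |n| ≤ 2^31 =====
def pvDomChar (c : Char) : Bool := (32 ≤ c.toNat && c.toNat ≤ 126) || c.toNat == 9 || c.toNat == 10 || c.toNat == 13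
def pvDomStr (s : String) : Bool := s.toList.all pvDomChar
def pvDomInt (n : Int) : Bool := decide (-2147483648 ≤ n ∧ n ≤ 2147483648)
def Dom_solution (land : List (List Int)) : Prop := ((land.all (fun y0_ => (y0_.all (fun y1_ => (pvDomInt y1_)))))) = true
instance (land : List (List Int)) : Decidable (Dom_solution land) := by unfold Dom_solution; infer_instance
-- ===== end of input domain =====

-- B replaces A's stack-based DFS flood fill by frontier-set saturation (level-wise set expansion,
-- no stack/queue) over the same grid; objective: alternative algorithm, same exact results.

-- ===== PORT A =====
-- land[x][y] (and v[x][y]) under the ports' 0 ≤ x < r / 0 ≤ y < c guards; exact on Pre_ (rows at least c long)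
def pvCell (m : List (List Int)) (x y : Int) : Int :=
  PySem.List.pyGetD (PySem.List.pyGetD m x []) y 0

-- v[x][y] = 1
def pvVSet (v : List (List Int)) (x y : Int) : List (List Int) :=
  PySem.List.pySetD v x (PySem.List.pySetD (PySem.List.pyGetD v x []) y 1)

def pvDirs : List (Int × Int) := [(1, 0), (-1, 0), (0, 1), (0, -1)]

-- the body of 'for dx, dy in …' : maybe mark+push one neighbour; state (q, v, cnt)
def pvProbe (land : List (List Int)) (r c x y : Int)
    (st : List (Int × Int) × List (List Int) × Int) (d : Int × Int) :
    List (Int × Int) × List (List Int) × Int :=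
  let nx := d.1 + x
  let ny := d.2 + y
  if 0 ≤ nx ∧ nx < r ∧ 0 ≤ ny ∧ ny < c ∧ pvCell land nx ny = 1 ∧ pvCell st.2.1 nx ny = 0 then
    ((nx, ny) :: st.1, pvVSet st.2.1 nx ny, st.2.2 + 1)
  else st

-- the 'while q' loop of find_oil; the stack head is Python's right end (append/pop); fuel is
-- only a termination bound, proved sufficient below
def pvFlood (land : List (List Int)) (r c : Int) :
    Nat → List (Int × Int) → List (List Int) → Int → PySem.Set Int →
    Int × PySem.Set Int × List (List Int)
  | 0, _, v, cnt, col => (cnt, col, v)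
  | fuel + 1, q, v, cnt, col =>
    match q with
    | [] => (cnt, col, v)
    | (x, y) :: q' =>
      let col' := PySem.Set.add col y
      let st := pvDirs.foldl (pvProbe land r c x y) (q', v, cnt)
      pvFlood land r c fuel st.1 st.2.1 st.2.2 col'

def solution (land : List (List Int)) : Int :=
  let r : Int := land.length
  let c : Int := (land.headD []).length
  let v0 := List.replicate r.toNat (List.replicate c.toNat (0 : Int))
  let oil0 := List.replicate c.toNat (0 : Int)
  let st := (PySem.List.pyRange 0 r 1).foldl (fun st i =>
    (PySem.List.pyRange 0 c 1).foldl (fun (st : List (List Int) × List Int) j =>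
      if pvCell st.1 i j = 0 ∧ pvCell land i j = 1 then
        let v1 := pvVSet st.1 i j
        let res := pvFlood land r c (2 * (r.toNat * c.toNat) + 1) [(i, j)] v1 1 PySem.Set.empty
        (res.2.2, res.2.1.foldl (fun oil o => oil.set o.toNat (oil.getD o.toNat 0 + res.1)) st.2)
      else st) st) (v0, oil0)
  (PySem.List.max? st.2 (fun x => x)).getD 0

-- ===== PORT B =====
def pvNbrs (p : Int × Int) : List (Int × Int) :=
  [(p.1 + 1, p.2), (p.1 - 1, p.2), (p.1, p.2 + 1), (p.1, p.2 - 1)]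

-- one saturation round: the set 'new' of unseen 1-neighbours of the frontier
def pvNew (land : List (List Int)) (r c : Int) (comp frontier : PySem.Set (Int × Int)) :
    PySem.Set (Int × Int) :=
  frontier.foldl (fun acc p =>
    (pvNbrs p).foldl (fun acc n =>
      if 0 ≤ n.1 ∧ n.1 < r ∧ 0 ≤ n.2 ∧ n.2 < c ∧ pvCell land n.1 n.2 = 1 ∧ n ∉ comp then
        PySem.Set.add acc n
      else acc) acc) PySem.Set.empty

-- the 'while frontier' saturation loop of component; fuel is only a termination bound
def pvSat (land : List (List Int)) (r c : Int) :
    Nat → PySem.Set (Int × Int) → PySem.Set (Int × Int) → PySem.Set (Int × Int)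
  | 0, comp, _ => comp
  | fuel + 1, comp, frontier =>
    if frontier = [] then comp
    else
      let new := pvNew land r c comp frontier
      pvSat land r c fuel (PySem.Set.union comp new) new

def solution_alt (land : List (List Int)) : Int :=
  let r : Int := land.length
  let c : Int := (land.headD []).length
  let st := (PySem.List.pyRange 0 r 1).foldl (fun st i =>
    (PySem.List.pyRange 0 c 1).foldl (fun (st : PySem.Set (Int × Int) × List Int) j =>
      if pvCell land i j = 1 ∧ (i, j) ∉ st.1 then
        let comp := pvSat land r c (r.toNat * c.toNat + 1)
          (PySem.Set.ofList [(i, j)]) (PySem.Set.ofList [(i, j)])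
        let size : Int := PySem.Set.len comp
        let cols := PySem.Set.ofList (comp.map Prod.snd)
        (PySem.Set.union st.1 comp,
         cols.foldl (fun oil y => oil.set y.toNat (oil.getD y.toNat 0 + size)) st.2)
      else st) st) (PySem.Set.empty, List.replicate c.toNat (0 : Int))
  (PySem.List.max? st.2 (fun x => x)).getD 0

-- ===== PRECONDITION & SPEC =====
-- Pre_ excludes exactly the inputs on which A raises: grids lacking a nonempty first row
-- (IndexError / ValueError) and ragged grids with some row shorter than the first
-- (IndexError while scanning); A returns normally on every other input.
def Pre_solution (land : List (List Int)) : Prop :=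
  land ≠ [] ∧ 0 < (land.headD []).length ∧
    ∀ row ∈ land, (land.headD []).length ≤ row.length
instance (land : List (List Int)) : Decidable (Pre_solution land) := by
  unfold Pre_solution; infer_instance

def pvWitness_solution : List (List Int) := [[1, 0, 1], [1, 0, 0]]

def Spec_solution (land : List (List Int)) (out : Int) : Prop := out = solution_alt land
instance (land : List (List Int)) (out : Int) : Decidable (Spec_solution land out) := by
  unfold Spec_solution; infer_instance

-- ===== CLAIM (what is proved, stated in full; the proofs are below) =====
def Claim_equal_solution : Prop :=
  ∀ (land : List (List Int)), Dom_solution land → Pre_solution land →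
    Spec_solution land (solution land)

-- ===== LEMMAS AND PROOFS =====

def pvOne (land : List (List Int)) (p : Int × Int) : Prop :=
  0 ≤ p.1 ∧ p.1 < (land.length : Int) ∧ 0 ≤ p.2 ∧ p.2 < ((land.headD []).length : Int) ∧
    pvCell land p.1 p.2 = 1

def pvAdj (land : List (List Int)) (p t : Int × Int) : Prop :=
  pvOne land p ∧ pvOne land t ∧ (t.1 - p.1).natAbs + (t.2 - p.2).natAbs = 1

def pvConn (land : List (List Int)) (s t : Int × Int) : Prop :=
  Relation.ReflTransGen (pvAdj land) s t

noncomputable def pvGrid (land : List (List Int)) : Finset (Int × Int) :=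
  Finset.Icc (0 : Int) ((land.length : Int) - 1) ×ˢ
    Finset.Icc (0 : Int) (((land.headD []).length : Int) - 1)

def pvClosed (land : List (List Int)) (S : Finset (Int × Int)) : Prop :=
  ∀ p ∈ S, ∀ t, pvAdj land p t → t ∈ S

theorem pvAdj_symm (land : List (List Int)) (p t : Int × Int) (h : pvAdj land p t) :
    pvAdj land t p := by
  obtain ⟨h1, h2, h3⟩ := h
  exact ⟨h2, h1, by omega⟩

theorem pvOne_of_conn (land : List (List Int)) (s t : Int × Int) (hs : pvOne land s)
    (h : pvConn land s t) : pvOne land t := by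
  induction h with
  | refl => exact hs
  | tail _ hadj _ => exact hadj.2.1

theorem pvConn_symm (land : List (List Int)) (s t : Int × Int) (h : pvConn land s t) :
    pvConn land t s := by
  induction h with
  | refl => exact Relation.ReflTransGen.refl
  | tail _ hadj ih => exact Relation.ReflTransGen.head (pvAdj_symm _ _ _ hadj) ih

theorem pvMem_grid_of_one (land : List (List Int)) (p : Int × Int) (h : pvOne land p) :
    p ∈ pvGrid land := by
  obtain ⟨h1, h2, h3, h4, _⟩ := h
  simp only [pvGrid, Finset.mem_product, Finset.mem_Icc]
  omega

theorem pvConn_mem_closed (land : List (List Int)) (S : Finset (Int × Int)) (s t : Int × Int)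
    (hcl : pvClosed land S) (hs : s ∈ S) (h : pvConn land s t) : t ∈ S := by
  induction h with
  | refl => exact hs
  | tail _ hadj ih => exact hcl _ ih _ hadj

theorem pvConn_not_mem_closed (land : List (List Int)) (S : Finset (Int × Int)) (s t : Int × Int)
    (hcl : pvClosed land S) (hs : s ∉ S) (h : pvConn land s t) : t ∉ S := fun ht =>
  hs (pvConn_mem_closed land S t s hcl ht (pvConn_symm land s t h))

theorem pvAdj_iff_dirs (land : List (List Int)) (p t : Int × Int) :
    pvAdj land p t ↔ pvOne land p ∧ pvOne land t ∧ (t.1 - p.1, t.2 - p.2) ∈ pvDirs := by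
  unfold pvAdj pvDirs
  constructor
  · rintro ⟨h1, h2, h3⟩
    refine ⟨h1, h2, ?_⟩
    simp only [List.mem_cons, List.not_mem_nil, or_false, Prod.ext_iff]
    omega
  · rintro ⟨h1, h2, h3⟩
    refine ⟨h1, h2, ?_⟩
    simp only [List.mem_cons, List.not_mem_nil, or_false, Prod.ext_iff] at h3
    omega

-- the neighbours of p are exactly the four pvNbrs positions
theorem pvAdj_iff_nbrs (land : List (List Int)) (p t : Int × Int) (hp : pvOne land p) :
    pvAdj land p t ↔ t ∈ pvNbrs p ∧ pvOne land t := by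
  rw [pvAdj_iff_dirs]
  constructor
  · rintro ⟨-, h2, h3⟩
    refine ⟨?_, h2⟩
    simp only [pvNbrs, pvDirs, List.mem_cons, List.not_mem_nil, or_false, Prod.ext_iff] at h3 ⊢
    omega
  · rintro ⟨h3, h2⟩
    refine ⟨hp, h2, ?_⟩
    simp only [pvNbrs, pvDirs, List.mem_cons, List.not_mem_nil, or_false, Prod.ext_iff] at h3 ⊢
    omega

def pvShape (land v : List (List Int)) : Prop :=
  v.length = land.length ∧ ∀ row ∈ v, row.length = (land.headD []).length

def pvMark (land v : List (List Int)) (W : Finset (Int × Int)) : Prop :=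
  ∀ p ∈ pvGrid land, pvCell v p.1 p.2 = if p ∈ W then 1 else 0

theorem pvGrid_mem_iff (land : List (List Int)) (p : Int × Int) :
    p ∈ pvGrid land ↔ 0 ≤ p.1 ∧ p.1 < (land.length : Int) ∧ 0 ≤ p.2 ∧
      p.2 < ((land.headD []).length : Int) := by
  simp only [pvGrid, Finset.mem_product, Finset.mem_Icc]
  omega

theorem pvCell_getD (v : List (List Int)) (x y : Int) (hx : 0 ≤ x) (hy : 0 ≤ y) :
    pvCell v x y = (v.getD x.toNat []).getD y.toNat 0 := by
  unfold pvCell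
  rw [← Int.toNat_of_nonneg hx, ← Int.toNat_of_nonneg hy,
    PySem.List.pyGetD_natCast, PySem.List.pyGetD_natCast, Int.toNat_natCast,
    Int.toNat_natCast]

theorem pvGetD_set (l : List (List Int)) (i j : Nat) (w : List Int) (hj : j < l.length) :
    (l.set i w).getD j [] = if i = j then w else l.getD j [] := by
  rw [List.getD_eq_getElem?_getD, List.getD_eq_getElem?_getD, List.getElem?_set]
  by_cases h : i = j
  · subst h
    simp [hj]
  · simp [h]

theorem pvGetD_set' (l : List Int) (i j : Nat) (w : Int) (hj : j < l.length) :
    (l.set i w).getD j 0 = if i = j then w else l.getD j 0 := by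
  rw [List.getD_eq_getElem?_getD, List.getD_eq_getElem?_getD, List.getElem?_set]
  by_cases h : i = j
  · subst h
    simp [hj]
  · simp [h]

theorem pvShape_v0 (land : List (List Int)) :
    pvShape land (List.replicate ((land.length : Int)).toNat
      (List.replicate (((land.headD []).length : Int)).toNat (0 : Int))) := by
  constructor
  · simp
  · intro row hrow
    simp only [List.eq_of_mem_replicate hrow, List.length_replicate, Int.toNat_natCast]

theorem pvMark_v0 (land : List (List Int)) :
    pvMark land (List.replicate ((land.length : Int)).toNat
      (List.replicate (((land.headD []).length : Int)).toNat (0 : Int))) ∅ := by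
  intro p hp
  rw [pvGrid_mem_iff] at hp
  have hz : ∀ (n m k l : Nat), ((List.replicate n (List.replicate m (0 : Int))).getD k []).getD l 0 = 0 := by
    intro n m k l
    rcases lt_or_ge k n with h | h
    · rw [List.getD_eq_getElem?_getD (l := List.replicate n (List.replicate m (0:Int))),
        List.getElem?_replicate, if_pos h, Option.getD_some]
      rcases lt_or_ge l m with h2 | h2
      · rw [List.getD_eq_getElem?_getD, List.getElem?_replicate, if_pos h2, Option.getD_some]
      · rw [List.getD_eq_getElem?_getD, List.getElem?_replicate, if_neg (by omega)]
        rfl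
    · rw [List.getD_eq_getElem?_getD (l := List.replicate n (List.replicate m (0:Int))),
        List.getElem?_replicate, if_neg (by omega)]
      rfl
  rw [pvCell_getD _ _ _ hp.1 hp.2.2.1, hz]
  simp

theorem pvVSet_spec (land v : List (List Int)) (W : Finset (Int × Int)) (x y : Int)
    (hsh : pvShape land v) (hm : pvMark land v W) (hg : (x, y) ∈ pvGrid land) :
    pvShape land (pvVSet v x y) ∧ pvMark land (pvVSet v x y) (insert (x, y) W) := by
  rw [pvGrid_mem_iff] at hg
  obtain ⟨hx, hx2, hy, hy2⟩ := hg
  obtain ⟨hlen, hrows⟩ := hsh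
  simp only at hx hx2 hy hy2
  have hrowmem : ∀ (k : Nat), k < v.length → v.getD k [] ∈ v := by
    intro k hk
    rw [List.getD_eq_getElem?_getD, List.getElem?_eq_getElem hk]
    exact List.getElem_mem hk
  have hvset : pvVSet v x y = v.set x.toNat ((v.getD x.toNat []).set y.toNat 1) := by
    unfold pvVSet
    rw [← Int.toNat_of_nonneg hx, PySem.List.pyGetD_natCast,
      PySem.List.pySetD_of_nonneg _ _ hy, PySem.List.pySetD_of_nonneg _ _ (by omega : (0:Int) ≤ (x.toNat : Int))]
    simp
    rw [max_eq_left hx]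
  have hxlt : x.toNat < v.length := by omega
  have hshape : pvShape land (pvVSet v x y) := by
    rw [hvset]
    refine ⟨by simpa using hlen, ?_⟩
    intro row hrowm
    rcases List.mem_or_eq_of_mem_set hrowm with h | h
    · exact hrows _ h
    · rw [h, List.length_set]; exact hrows _ (hrowmem _ hxlt)
  refine ⟨hshape, ?_⟩
  intro p hp
  have hpg := hp
  rw [pvGrid_mem_iff] at hpg
  obtain ⟨hp1, hp2, hp3, hp4⟩ := hpg
  have hmv := hm p hp
  rw [pvCell_getD _ _ _ hp1 hp3] at hmv
  rw [pvCell_getD _ _ _ hp1 hp3, hvset, pvGetD_set _ _ _ _ (by omega)]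
  by_cases hex : x.toNat = p.1.toNat
  · have hexi : p.1 = x := by omega
    rw [if_pos hex, pvGetD_set' _ _ _ _ (by rw [hrows _ (hrowmem _ hxlt)]; omega)]
    by_cases hey : y.toNat = p.2.toNat
    · have heyi : p.2 = y := by omega
      have hpxy : p = (x, y) := Prod.ext hexi heyi
      rw [if_pos hey, hpxy]
      simp
    · have heyi : p.2 ≠ y := by omega
      have hpxy : p ≠ (x, y) := fun h => heyi (by rw [h])
      rw [if_neg hey]
      simp only [Finset.mem_insert, hpxy, false_or]
      rw [hexi] at hmv
      exact hmv
  · have hexi : p.1 ≠ x := by omega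
    have hpxy : p ≠ (x, y) := fun h => hexi (by rw [h])
    rw [if_neg hex]
    simp only [Finset.mem_insert, hpxy, false_or]
    exact hmv

theorem pvFoldAddIf_mem {α : Type} [BEq α] [LawfulBEq α] (P : α → Prop) [DecidablePred P]
    (l : List α) (s : PySem.Set α) (t : α) :
    t ∈ l.foldl (fun acc n => if P n then PySem.Set.add acc n else acc) s ↔
      t ∈ s ∨ ∃ n ∈ l, P n ∧ t = n := by
  induction l generalizing s with
  | nil => simp
  | cons a l ih =>
    simp only [List.foldl_cons, ih]
    by_cases h : P a
    · rw [if_pos h]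
      simp only [PySem.Set.mem_add, List.mem_cons]
      constructor
      · rintro (⟨h1 | h1⟩ | ⟨n, hn, hPn, ht⟩)
        · exact Or.inl h1
        · exact Or.inr ⟨a, Or.inl rfl, h, h1⟩
        · exact Or.inr ⟨n, Or.inr hn, hPn, ht⟩
      · rintro (h1 | ⟨n, hn | hn, hPn, ht⟩)
        · exact Or.inl (Or.inl h1)
        · exact Or.inl (Or.inr (by rw [ht, hn]))
        · exact Or.inr ⟨n, hn, hPn, ht⟩
    · rw [if_neg h]
      simp only [List.mem_cons]
      constructor
      · rintro (h1 | ⟨n, hn, hPn, ht⟩)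
        · exact Or.inl h1
        · exact Or.inr ⟨n, Or.inr hn, hPn, ht⟩
      · rintro (h1 | ⟨n, hn | hn, hPn, ht⟩)
        · exact Or.inl h1
        · exact absurd (hn ▸ hPn) h
        · exact Or.inr ⟨n, hn, hPn, ht⟩

theorem pvNew_mem (land : List (List Int)) (r c : Int) (comp frontier : PySem.Set (Int × Int))
    (t : Int × Int) :
    t ∈ pvNew land r c comp frontier ↔
      ∃ p ∈ frontier, t ∈ pvNbrs p ∧ 0 ≤ t.1 ∧ t.1 < r ∧ 0 ≤ t.2 ∧ t.2 < c ∧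
        pvCell land t.1 t.2 = 1 ∧ t ∉ comp := by
  unfold pvNew
  have aux : ∀ (l : List (Int × Int)) (acc : PySem.Set (Int × Int)),
      t ∈ l.foldl (fun acc p =>
        (pvNbrs p).foldl (fun acc n =>
          if 0 ≤ n.1 ∧ n.1 < r ∧ 0 ≤ n.2 ∧ n.2 < c ∧ pvCell land n.1 n.2 = 1 ∧ n ∉ comp then
            PySem.Set.add acc n
          else acc) acc) acc ↔
      t ∈ acc ∨ ∃ p ∈ l, t ∈ pvNbrs p ∧ 0 ≤ t.1 ∧ t.1 < r ∧ 0 ≤ t.2 ∧ t.2 < c ∧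
        pvCell land t.1 t.2 = 1 ∧ t ∉ comp := by
    intro l
    induction l with
    | nil => simp
    | cons a l ih =>
      intro acc
      simp only [List.foldl_cons, ih,
        pvFoldAddIf_mem (fun n => 0 ≤ n.1 ∧ n.1 < r ∧ 0 ≤ n.2 ∧ n.2 < c ∧
          pvCell land n.1 n.2 = 1 ∧ n ∉ comp) (pvNbrs a) acc t, List.mem_cons]
      constructor
      · rintro (⟨ht | ⟨n, hn, hP, rfl⟩⟩ | ⟨p, hp, hrest⟩)
        · exact Or.inl ht
        · exact Or.inr ⟨a, Or.inl rfl, hn, hP⟩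
        · exact Or.inr ⟨p, Or.inr hp, hrest⟩
      · rintro (ht | ⟨p, rfl | hp, hrest⟩)
        · exact Or.inl (Or.inl ht)
        · exact Or.inl (Or.inr ⟨t, hrest.1, hrest.2, rfl⟩)
        · exact Or.inr ⟨p, hp, hrest⟩
  rw [aux]
  simp

theorem pvSat_nil (land : List (List Int)) (r c : Int) (fuel : Nat)
    (comp : PySem.Set (Int × Int)) : pvSat land r c fuel comp [] = comp := by
  cases fuel <;> simp [pvSat]

theorem pvSat_spec (land : List (List Int)) (s : Int × Int) (hs1 : pvOne land s) :
    ∀ (fuel : Nat) (comp frontier : PySem.Set (Int × Int)),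
    comp.Nodup →
    s ∈ comp →
    (∀ p ∈ frontier, p ∈ comp) →
    (∀ p ∈ comp, pvConn land s p) →
    (∀ p ∈ comp, p ∉ frontier → ∀ t, pvAdj land p t → t ∈ comp) →
    (pvGrid land \ comp.toFinset).card + 2 ≤ fuel →
    (pvSat land (land.length : Int) ((land.headD []).length : Int) fuel comp frontier).Nodup ∧
    (∀ p ∈ comp, p ∈ pvSat land (land.length : Int) ((land.headD []).length : Int) fuel comp frontier) ∧
    s ∈ pvSat land (land.length : Int) ((land.headD []).length : Int) fuel comp frontier ∧
    (∀ p ∈ pvSat land (land.length : Int) ((land.headD []).length : Int) fuel comp frontier,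
      pvConn land s p) ∧
    (∀ p ∈ pvSat land (land.length : Int) ((land.headD []).length : Int) fuel comp frontier,
      ∀ t, pvAdj land p t → t ∈ pvSat land (land.length : Int) ((land.headD []).length : Int) fuel comp frontier) := by
  intro fuel
  induction fuel with
  | zero =>
    intro comp frontier _ _ _ _ _ hb
    omega
  | succ fuel ih =>
    intro comp frontier hnd hscomp hfr hconn hcl hb
    by_cases hfe : frontier = []
    · subst hfe
      rw [pvSat_nil]
      exact ⟨hnd, fun p hp => hp, hscomp, hconn, fun p hp t hadj => hcl p hp (by simp) t hadj⟩
    · have hstep : pvSat land (land.length : Int) ((land.headD []).length : Int) (fuel + 1) comp frontier =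
        pvSat land (land.length : Int) ((land.headD []).length : Int) fuel
          (PySem.Set.union comp (pvNew land (land.length : Int) ((land.headD []).length : Int) comp frontier))
          (pvNew land (land.length : Int) ((land.headD []).length : Int) comp frontier) := by
        rw [pvSat, if_neg hfe]
      set new := pvNew land (land.length : Int) ((land.headD []).length : Int) comp frontier with hnewdef
      -- facts about new
      have hnewmem : ∀ t, t ∈ new ↔ ∃ p ∈ frontier, t ∈ pvNbrs p ∧ pvOne land t ∧ t ∉ comp := by
        intro t
        rw [hnewdef, pvNew_mem]
        unfold pvOne
        tauto
      have hnewadj : ∀ t ∈ new, ∃ p ∈ comp, pvAdj land p t ∧ t ∉ comp := by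
        intro t ht
        obtain ⟨p, hp, hnb, hone, hnc⟩ := (hnewmem t).1 ht
        have hpone : pvOne land p := pvOne_of_conn land s p hs1 (hconn p (hfr p hp))
        exact ⟨p, hfr p hp, (pvAdj_iff_nbrs land p t hpone).2 ⟨hnb, hone⟩, hnc⟩
      -- the merged set
      have hmemU : ∀ t, t ∈ PySem.Set.union comp new ↔ t ∈ comp ∨ t ∈ new :=
        fun t => PySem.Set.mem_union comp new t
      have hndU : (PySem.Set.union comp new).Nodup := PySem.Set.nodup_union comp new hnd
      have hconnU : ∀ p ∈ PySem.Set.union comp new, pvConn land s p := by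
        intro p hp
        rcases (hmemU p).1 hp with h | h
        · exact hconn p h
        · obtain ⟨p', hp', hadj, _⟩ := hnewadj p h
          exact Relation.ReflTransGen.tail (hconn p' hp') hadj
      have hclU : ∀ p ∈ PySem.Set.union comp new, p ∉ new → ∀ t, pvAdj land p t →
          t ∈ PySem.Set.union comp new := by
        intro p hp hpn t hadj
        rcases (hmemU p).1 hp with h | h
        · by_cases hpf : p ∈ frontier
          · by_cases htc : t ∈ comp
            · exact (hmemU t).2 (Or.inl htc)
            · refine (hmemU t).2 (Or.inr ((hnewmem t).2 ⟨p, hpf, ?_, hadj.2.1, htc⟩))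
              have hpone : pvOne land p := hadj.1
              exact ((pvAdj_iff_nbrs land p t hpone).1 hadj).1
          · exact (hmemU t).2 (Or.inl (hcl p h hpf t hadj))
        · exact absurd h hpn
      by_cases hne : new = []
      · -- no growth: the next round sees an empty frontier and stops
        rw [hstep, hne]
        have hU : PySem.Set.union comp ([] : PySem.Set (Int × Int)) = comp := rfl
        rw [hU, pvSat_nil]
        refine ⟨hnd, fun p hp => hp, hscomp, hconn, ?_⟩
        intro p hp t hadj
        have := hclU p ((hmemU p).2 (Or.inl hp)) (by rw [hne]; simp) t hadj
        rcases (hmemU t).1 this with h | h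
        · exact h
        · rw [hne] at h
          simp at h
      · -- strict growth
        obtain ⟨n0, hn0⟩ := List.exists_mem_of_ne_nil new hne
        have hn0g : n0 ∈ pvGrid land := by
          obtain ⟨p, hp, hnb, hone, hnc⟩ := (hnewmem n0).1 hn0
          exact pvMem_grid_of_one land n0 hone
        have hn0c : n0 ∉ comp := ((hnewmem n0).1 hn0).choose_spec.2.2.2
        have hsub : comp.toFinset ⊆ (PySem.Set.union comp new).toFinset := by
          intro a ha
          rw [List.mem_toFinset] at ha ⊢
          exact (hmemU a).2 (Or.inl ha)
        have hcard : (pvGrid land \ (PySem.Set.union comp new).toFinset).card + 1 ≤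
            (pvGrid land \ comp.toFinset).card := by
          have hss : pvGrid land \ (PySem.Set.union comp new).toFinset ⊂
              pvGrid land \ comp.toFinset := by
            constructor
            · exact Finset.sdiff_subset_sdiff (Finset.Subset.refl _) hsub
            · intro hcontra
              have hn0in : n0 ∈ pvGrid land \ comp.toFinset := by
                rw [Finset.mem_sdiff, List.mem_toFinset]
                exact ⟨hn0g, hn0c⟩
              have := hcontra hn0in
              rw [Finset.mem_sdiff, List.mem_toFinset] at this
              exact this.2 ((hmemU n0).2 (Or.inr hn0))
          have := Finset.card_lt_card hss
          omega
        rw [hstep]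
        obtain ⟨a, b, c, d, e⟩ := ih (PySem.Set.union comp new) new hndU
          ((hmemU s).2 (Or.inl hscomp)) (fun p hp => (hmemU p).2 (Or.inr hp)) hconnU
          (fun p hp hpn t hadj => hclU p hp hpn t hadj) (by omega)
        exact ⟨a, fun p hp => b p ((hmemU p).2 (Or.inl hp)), c, d, e⟩

theorem pvGrid_card (land : List (List Int)) :
    (pvGrid land).card = land.length * (land.headD []).length := by
  simp [pvGrid, Int.card_Icc]

theorem pvSat_top (land : List (List Int)) (s : Int × Int) (hs1 : pvOne land s) :
    (pvSat land (land.length : Int) ((land.headD []).length : Int)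
      (((land.length : Int)).toNat * (((land.headD []).length : Int)).toNat + 1)
      (PySem.Set.ofList [s]) (PySem.Set.ofList [s])).Nodup ∧
    ∀ t, t ∈ pvSat land (land.length : Int) ((land.headD []).length : Int)
      (((land.length : Int)).toNat * (((land.headD []).length : Int)).toNat + 1)
      (PySem.Set.ofList [s]) (PySem.Set.ofList [s]) ↔ pvConn land s t := by
  have hofl : PySem.Set.ofList [s] = [s] := rfl
  have hsg : s ∈ pvGrid land := pvMem_grid_of_one land s hs1
  have hcard : (pvGrid land \ ([s] : List (Int × Int)).toFinset).card + 2 ≤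
      ((land.length : Int)).toNat * (((land.headD []).length : Int)).toNat + 1 := by
    have h1 : ({s} : Finset (Int × Int)) ⊆ pvGrid land := by
      intro a ha
      rw [Finset.mem_singleton] at ha
      exact ha ▸ hsg
    have h2 : ([s] : List (Int × Int)).toFinset = {s} := by simp
    rw [h2, Finset.card_sdiff, Finset.inter_eq_left.2 h1, Finset.card_singleton]
    have h3 := pvGrid_card land
    have h4 : 1 ≤ (pvGrid land).card := Finset.card_pos.2 ⟨s, hsg⟩
    simp only [Int.toNat_natCast]
    omega
  obtain ⟨hnd, hsub, hsin, hconn, hcl⟩ := pvSat_spec land s hs1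
    (((land.length : Int)).toNat * (((land.headD []).length : Int)).toNat + 1)
    (PySem.Set.ofList [s]) (PySem.Set.ofList [s]) (by rw [hofl]; simp) (by rw [hofl]; simp)
    (fun p hp => hp)
    (by rw [hofl]; intro p hp; rw [List.mem_singleton] at hp; exact hp ▸ Relation.ReflTransGen.refl)
    (by rw [hofl]; intro p hp hpn t hadj; rw [List.mem_singleton] at hp; subst hp
        exact absurd (List.mem_singleton_self p) hpn)
    (by rw [hofl]; exact hcard)
  refine ⟨hnd, fun t => ⟨fun ht => hconn t ht, fun ht => ?_⟩⟩
  induction ht with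
  | refl => exact hsin
  | tail h' hadj ih => exact hcl _ ih _ hadj

def pvFR (land : List (List Int)) (U : Finset (Int × Int)) (s p0 : Int × Int) (N : Nat)
    (st : List (Int × Int) × List (List Int) × Int) (M : Finset (Int × Int)) : Prop :=
  pvShape land st.2.1 ∧
  pvMark land st.2.1 (U ∪ M) ∧
  (∀ p ∈ st.1, p ∈ M) ∧
  st.1.Nodup ∧
  p0 ∉ st.1 ∧
  p0 ∈ M ∧
  s ∈ M ∧
  st.2.2 = (M.card : Int) ∧
  (∀ p ∈ M, pvConn land s p) ∧
  (∀ p ∈ M, p ∉ st.1 → p ≠ p0 → ∀ t, pvAdj land p t → t ∈ M) ∧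
  2 * (pvGrid land \ (U ∪ M)).card + st.1.length ≤ N

theorem pvProbe_spec (land : List (List Int)) (U : Finset (Int × Int)) (s p0 : Int × Int)
    (_hU : pvClosed land U) (_hsU : s ∉ U) (hs1 : pvOne land s) (N : Nat)
    (st : List (Int × Int) × List (List Int) × Int) (M : Finset (Int × Int))
    (hrel : pvFR land U s p0 N st M) (d : Int × Int) (hd : d ∈ pvDirs) :
    ∃ M2, M ⊆ M2 ∧
      pvFR land U s p0 N
        (pvProbe land (land.length : Int) ((land.headD []).length : Int) p0.1 p0.2 st d) M2 ∧
      (∀ p ∈ st.1, p ∈ (pvProbe land (land.length : Int) ((land.headD []).length : Int) p0.1 p0.2 st d).1) ∧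
      (pvOne land (d.1 + p0.1, d.2 + p0.2) → (d.1 + p0.1, d.2 + p0.2) ∈ U ∪ M2) ∧
      (∀ p, (p ∈ M2 ∧ p ∉ (pvProbe land (land.length : Int) ((land.headD []).length : Int) p0.1 p0.2 st d).1)
        ↔ (p ∈ M ∧ p ∉ st.1)) := by
  obtain ⟨hsh, hmk, hq, hnd, hp0q, hp0M, hsM, hcnt, hconn, hclth, hmeas⟩ := hrel
  set n : Int × Int := (d.1 + p0.1, d.2 + p0.2) with hn
  have hng : 0 ≤ n.1 ∧ n.1 < (land.length : Int) ∧ 0 ≤ n.2 ∧ n.2 < ((land.headD []).length : Int) →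
      n ∈ pvGrid land := by
    intro h
    rw [pvGrid_mem_iff]
    exact h
  by_cases hg : 0 ≤ d.1 + p0.1 ∧ d.1 + p0.1 < (land.length : Int) ∧ 0 ≤ d.2 + p0.2 ∧
      d.2 + p0.2 < ((land.headD []).length : Int) ∧ pvCell land (d.1 + p0.1) (d.2 + p0.2) = 1 ∧
      pvCell st.2.1 (d.1 + p0.1) (d.2 + p0.2) = 0
  · -- the neighbour is new: marked and pushed
    have hnone : pvOne land n := ⟨hg.1, hg.2.1, hg.2.2.1, hg.2.2.2.1, hg.2.2.2.2.1⟩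
    have hngrid : n ∈ pvGrid land := pvMem_grid_of_one land n hnone
    have hnnew : n ∉ U ∪ M := by
      intro hmem
      have := hmk n hngrid
      rw [if_pos hmem] at this
      rw [this] at hg
      exact absurd hg.2.2.2.2.2 (by norm_num)
    have hadj : pvAdj land p0 n := by
      refine ⟨pvOne_of_conn land s p0 hs1 (hconn p0 hp0M), hnone, ?_⟩
      simp only [pvDirs, List.mem_cons, List.not_mem_nil, or_false] at hd
      rcases hd with rfl | rfl | rfl | rfl <;> simp [hn]
    have hconnn : pvConn land s n := Relation.ReflTransGen.tail (hconn p0 hp0M) hadj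
    have hstep : pvProbe land (land.length : Int) ((land.headD []).length : Int) p0.1 p0.2 st d =
        (n :: st.1, pvVSet st.2.1 n.1 n.2, st.2.2 + 1) := by
      unfold pvProbe
      rw [if_pos hg]
    have hvs := pvVSet_spec land st.2.1 (U ∪ M) n.1 n.2 hsh hmk (by rw [← hn] at *; exact hngrid)
    have hnM : n ∉ M := fun h => hnnew (Finset.mem_union_right _ h)
    have hnq : n ∉ st.1 := fun h => hnM (hq n h)
    have hnp0 : p0 ≠ n := fun h => hnnew (h ▸ Finset.mem_union_right _ hp0M)
    refine ⟨insert n M, Finset.subset_insert _ _, ?_, ?_, ?_, ?_⟩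
    · rw [hstep]
      refine ⟨hvs.1, ?_, ?_, ?_, ?_, Finset.mem_insert_of_mem hp0M, Finset.mem_insert_of_mem hsM, ?_, ?_, ?_, ?_⟩
      · have : U ∪ insert n M = insert (n.1, n.2) (U ∪ M) := by
          rw [Finset.union_insert]
        rw [this]
        exact hvs.2
      · intro p hp
        rcases List.mem_cons.1 hp with rfl | hp
        · exact Finset.mem_insert_self _ _
        · exact Finset.mem_insert_of_mem (hq p hp)
      · exact List.nodup_cons.2 ⟨hnq, hnd⟩
      · intro h
        rcases List.mem_cons.1 h with h | h
        · exact hnp0 h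
        · exact hp0q h
      · simp only [hcnt, Finset.card_insert_of_notMem hnM]
        push_cast
        ring
      · intro p hp
        rcases Finset.mem_insert.1 hp with rfl | hp
        · exact hconnn
        · exact hconn p hp
      · intro p hp hpq hpp0 t hadjt
        rcases Finset.mem_insert.1 hp with rfl | hp
        · exact absurd (List.mem_cons_self) hpq
        · exact Finset.mem_insert_of_mem (hclth p hp (fun h => hpq (List.mem_cons_of_mem _ h)) hpp0 t hadjt)
      · have hcard : (pvGrid land \ (U ∪ insert n M)).card + 1 =
            (pvGrid land \ (U ∪ M)).card := by
          have h1 : U ∪ insert n M = insert n (U ∪ M) := Finset.union_insert _ _ _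
          have h3 : n ∈ pvGrid land \ (U ∪ M) := Finset.mem_sdiff.2 ⟨hngrid, hnnew⟩
          have h4 : 0 < (pvGrid land \ (U ∪ M)).card := Finset.card_pos.2 ⟨n, h3⟩
          rw [h1, Finset.sdiff_insert, Finset.card_erase_of_mem h3]
          omega
        simp only [List.length_cons]
        omega
    · intro p hp
      rw [hstep]
      exact List.mem_cons_of_mem _ hp
    · intro _
      exact Finset.mem_union_right _ (Finset.mem_insert_self _ _)
    · intro p
      rw [hstep]
      simp only [List.mem_cons, Finset.mem_insert]
      constructor
      · rintro ⟨rfl | hpM, hpq⟩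
        · exact absurd (Or.inl rfl) hpq
        · exact ⟨hpM, fun h => hpq (Or.inr h)⟩
      · rintro ⟨hpM, hpq⟩
        exact ⟨Or.inr hpM, fun h => (by
          rcases h with rfl | h
          · exact hnM hpM
          · exact hpq h)⟩
  · -- no-op probe
    have hstep : pvProbe land (land.length : Int) ((land.headD []).length : Int) p0.1 p0.2 st d = st := by
      unfold pvProbe
      rw [if_neg hg]
    refine ⟨M, Finset.Subset.refl _, ?_, ?_, ?_, ?_⟩
    · rw [hstep]
      exact ⟨hsh, hmk, hq, hnd, hp0q, hp0M, hsM, hcnt, hconn, hclth, hmeas⟩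
    · intro p hp
      rw [hstep]
      exact hp
    · intro hone
      by_contra hmem
      have := hmk n (pvMem_grid_of_one land n hone)
      rw [if_neg hmem] at this
      obtain ⟨h1, h2, h3, h4, h5⟩ := hone
      exact hg ⟨h1, h2, h3, h4, h5, this⟩
    · intro p
      rw [hstep]

theorem pvAdj_offset (land : List (List Int)) (p0 t : Int × Int) (h : pvAdj land p0 t) :
    ∃ d ∈ pvDirs, t = (d.1 + p0.1, d.2 + p0.2) := by
  have h' := (pvAdj_iff_dirs land p0 t).1 h
  refine ⟨(t.1 - p0.1, t.2 - p0.2), h'.2.2, ?_⟩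
  apply Prod.ext <;> simp

theorem pvFlood_spec (land : List (List Int)) (U : Finset (Int × Int)) (s : Int × Int)
    (hU : pvClosed land U) (hsU : s ∉ U) (hs1 : pvOne land s) :
    ∀ (fuel : Nat) (q : List (Int × Int)) (v : List (List Int)) (cnt : Int)
      (col : PySem.Set Int) (M : Finset (Int × Int)),
    pvShape land v → pvMark land v (U ∪ M) →
    (∀ p ∈ q, p ∈ M) → q.Nodup → s ∈ M →
    cnt = (M.card : Int) →
    (∀ p ∈ M, pvConn land s p) →
    (∀ p ∈ M, p ∉ q → ∀ t, pvAdj land p t → t ∈ M) →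
    col.Nodup → (∀ y, y ∈ col ↔ ∃ x, (x, y) ∈ M ∧ (x, y) ∉ q) →
    2 * (pvGrid land \ (U ∪ M)).card + q.length ≤ fuel →
    ∃ Mf : Finset (Int × Int), M ⊆ Mf ∧
      (∀ p ∈ Mf, pvConn land s p) ∧
      (∀ p ∈ Mf, ∀ t, pvAdj land p t → t ∈ Mf) ∧
      (pvFlood land (land.length : Int) ((land.headD []).length : Int) fuel q v cnt col).1 = (Mf.card : Int) ∧
      (pvFlood land (land.length : Int) ((land.headD []).length : Int) fuel q v cnt col).2.1.Nodup ∧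
      (∀ y, y ∈ (pvFlood land (land.length : Int) ((land.headD []).length : Int) fuel q v cnt col).2.1 ↔
        ∃ x, (x, y) ∈ Mf) ∧
      pvShape land (pvFlood land (land.length : Int) ((land.headD []).length : Int) fuel q v cnt col).2.2 ∧
      pvMark land (pvFlood land (land.length : Int) ((land.headD []).length : Int) fuel q v cnt col).2.2 (U ∪ Mf) := by
  intro fuel
  induction fuel with
  | zero =>
    intro q v cnt col M hsh hmk hq hnd hsM hcnt hconn hcl hcnd hcmem hmeas
    have hqnil : q = [] := List.length_eq_zero_iff.1 (by omega)
    subst hqnil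
    refine ⟨M, Finset.Subset.refl _, hconn, fun p hp t ht => hcl p hp (by simp) t ht, ?_⟩
    simp only [pvFlood]
    exact ⟨hcnt, hcnd, fun y => by rw [hcmem y]; simp, hsh, hmk⟩
  | succ fuel ih =>
    intro q v cnt col M hsh hmk hq hnd hsM hcnt hconn hcl hcnd hcmem hmeas
    match q with
    | [] =>
      refine ⟨M, Finset.Subset.refl _, hconn, fun p hp t ht => hcl p hp (by simp) t ht, ?_⟩
      simp only [pvFlood]
      exact ⟨hcnt, hcnd, fun y => by rw [hcmem y]; simp, hsh, hmk⟩
    | (x, y) :: q' =>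
      set p0 : Int × Int := (x, y) with hp0def
      have hp0M : p0 ∈ M := hq p0 List.mem_cons_self
      have hrel0 : pvFR land U s p0 fuel (q', v, cnt) M := by
        refine ⟨hsh, hmk, fun p hp => hq p (List.mem_cons_of_mem _ hp), (List.nodup_cons.1 hnd).2,
          (List.nodup_cons.1 hnd).1, hp0M, hsM, hcnt, hconn, ?_, ?_⟩
        · intro p hp hpq hpp0 t hadj
          exact hcl p hp (by
            intro hmem
            rcases List.mem_cons.1 hmem with h | h
            · exact hpp0 h
            · exact hpq h) t hadj
        · simp only [List.length_cons] at hmeas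
          show 2 * (pvGrid land \ (U ∪ M)).card + q'.length ≤ fuel
          omega
      obtain ⟨M1, hsub1, hrel1, hqs1, hnb1, hpop1⟩ :=
        pvProbe_spec land U s p0 hU hsU hs1 fuel (q', v, cnt) M hrel0 (1, 0) (by simp [pvDirs])
      obtain ⟨M2, hsub2, hrel2, hqs2, hnb2, hpop2⟩ :=
        pvProbe_spec land U s p0 hU hsU hs1 fuel _ M1 hrel1 (-1, 0) (by simp [pvDirs])
      obtain ⟨M3, hsub3, hrel3, hqs3, hnb3, hpop3⟩ :=
        pvProbe_spec land U s p0 hU hsU hs1 fuel _ M2 hrel2 (0, 1) (by simp [pvDirs])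
      obtain ⟨M4, hsub4, hrel4, hqs4, hnb4, hpop4⟩ :=
        pvProbe_spec land U s p0 hU hsU hs1 fuel _ M3 hrel3 (0, -1) (by simp [pvDirs])
      set st4 := pvProbe land (land.length : Int) ((land.headD []).length : Int) p0.1 p0.2
        (pvProbe land (land.length : Int) ((land.headD []).length : Int) p0.1 p0.2
          (pvProbe land (land.length : Int) ((land.headD []).length : Int) p0.1 p0.2
            (pvProbe land (land.length : Int) ((land.headD []).length : Int) p0.1 p0.2
              (q', v, cnt) (1, 0)) (-1, 0)) (0, 1)) (0, -1) with hst4def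
      have hfold : pvDirs.foldl
          (pvProbe land (land.length : Int) ((land.headD []).length : Int) x y) (q', v, cnt) = st4 := by
        simp only [pvDirs, List.foldl_cons, List.foldl_nil, hst4def, hp0def]
      have hflood : pvFlood land (land.length : Int) ((land.headD []).length : Int) (fuel + 1)
          ((x, y) :: q') v cnt col =
          pvFlood land (land.length : Int) ((land.headD []).length : Int) fuel
            st4.1 st4.2.1 st4.2.2 (PySem.Set.add col y) := by
        conv_lhs => rw [pvFlood]
        rw [hfold]
      obtain ⟨hsh4, hmk4, hq4, hnd4, hp0q4, hp0M4, hsM4, hcnt4, hconn4, hclth4, hmeas4⟩ := hrel4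
      have hsubM : M ⊆ M4 := hsub1.trans (hsub2.trans (hsub3.trans hsub4))
      -- the popped-cells tracker, chained through the four probes
      have hpop : ∀ p, (p ∈ M4 ∧ p ∉ st4.1) ↔ (p ∈ M ∧ p ∉ q') := by
        intro p
        rw [hpop4, hpop3, hpop2, hpop1]
      -- all four neighbours of p0, lifted to M4
      have hnb : ∀ t, pvAdj land p0 t → t ∈ U ∪ M4 := by
        intro t hadj
        obtain ⟨d, hd, rfl⟩ := pvAdj_offset land p0 t hadj
        have hone : pvOne land (d.1 + p0.1, d.2 + p0.2) := hadj.2.1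
        have hlift12 : U ∪ M1 ⊆ U ∪ M4 :=
          Finset.union_subset_union (Finset.Subset.refl _) (hsub2.trans (hsub3.trans hsub4))
        have hlift2 : U ∪ M2 ⊆ U ∪ M4 :=
          Finset.union_subset_union (Finset.Subset.refl _) (hsub3.trans hsub4)
        have hlift3 : U ∪ M3 ⊆ U ∪ M4 :=
          Finset.union_subset_union (Finset.Subset.refl _) hsub4
        simp only [pvDirs, List.mem_cons, List.not_mem_nil, or_false] at hd
        rcases hd with rfl | rfl | rfl | rfl
        · exact hlift12 (hnb1 hone)
        · exact hlift2 (hnb2 hone)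
        · exact hlift3 (hnb3 hone)
        · exact hnb4 hone
      -- closure of the new state
      have hcl4 : ∀ p ∈ M4, p ∉ st4.1 → ∀ t, pvAdj land p t → t ∈ M4 := by
        intro p hp hpq t hadj
        by_cases hpp0 : p = p0
        · subst hpp0
          have ht4 := hnb t hadj
          rcases Finset.mem_union.1 ht4 with h | h
          · exfalso
            have hconnt : pvConn land s t :=
              Relation.ReflTransGen.tail (hconn4 p0 hp) hadj
            exact pvConn_not_mem_closed land U s t hU hsU hconnt h
          · exact h
        · exact hclth4 p hp hpq hpp0 t hadj
      -- the new col
      have hcnd' : (PySem.Set.add col y).Nodup := PySem.Set.nodup_add _ _ hcnd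
      have hcmem' : ∀ y', y' ∈ PySem.Set.add col y ↔ ∃ x', (x', y') ∈ M4 ∧ (x', y') ∉ st4.1 := by
        intro y'
        rw [PySem.Set.mem_add]
        constructor
        · rintro (h | hy)
          · obtain ⟨x', hx1, hx2⟩ := (hcmem y').1 h
            exact ⟨x', (hpop (x', y')).2 ⟨hx1, fun hh => hx2 (List.mem_cons_of_mem _ hh)⟩⟩
          · rw [hy]
            exact ⟨x, (hpop (x, y)).2 ⟨hp0M, (List.nodup_cons.1 hnd).1⟩⟩
        · rintro ⟨x', hx⟩
          have := (hpop (x', y')).1 hx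
          by_cases hpp0 : (x', y') = p0
          · right
            rw [hp0def] at hpp0
            exact (Prod.ext_iff.1 hpp0).2
          · left
            refine (hcmem y').2 ⟨x', this.1, ?_⟩
            intro hmem
            rcases List.mem_cons.1 hmem with h | h
            · exact hpp0 h
            · exact this.2 h
      rw [hflood]
      obtain ⟨Mf, hsubf, hconnf, hclf, hres⟩ := ih st4.1 st4.2.1 st4.2.2 (PySem.Set.add col y) M4
        hsh4 hmk4 hq4 hnd4 hsM4 hcnt4 hconn4 hcl4 hcnd' hcmem' hmeas4
      exact ⟨Mf, hsubM.trans hsubf, hconnf, hclf, hres⟩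

theorem pvFlood_top (land : List (List Int)) (U : Finset (Int × Int)) (v : List (List Int))
    (i j : Int) (hU : pvClosed land U) (hsU : (i, j) ∉ U) (hs1 : pvOne land (i, j))
    (hsh : pvShape land v) (hmk : pvMark land v U) :
    ∃ Mf : Finset (Int × Int),
      (∀ t, t ∈ Mf ↔ pvConn land (i, j) t) ∧
      (pvFlood land (land.length : Int) ((land.headD []).length : Int)
        (2 * (((land.length : Int)).toNat * (((land.headD []).length : Int)).toNat) + 1)
        [(i, j)] (pvVSet v i j) 1 PySem.Set.empty).1 = (Mf.card : Int) ∧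
      (pvFlood land (land.length : Int) ((land.headD []).length : Int)
        (2 * (((land.length : Int)).toNat * (((land.headD []).length : Int)).toNat) + 1)
        [(i, j)] (pvVSet v i j) 1 PySem.Set.empty).2.1.Nodup ∧
      (∀ y, y ∈ (pvFlood land (land.length : Int) ((land.headD []).length : Int)
        (2 * (((land.length : Int)).toNat * (((land.headD []).length : Int)).toNat) + 1)
        [(i, j)] (pvVSet v i j) 1 PySem.Set.empty).2.1 ↔ ∃ x, (x, y) ∈ Mf) ∧
      pvShape land (pvFlood land (land.length : Int) ((land.headD []).length : Int)
        (2 * (((land.length : Int)).toNat * (((land.headD []).length : Int)).toNat) + 1)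
        [(i, j)] (pvVSet v i j) 1 PySem.Set.empty).2.2 ∧
      pvMark land (pvFlood land (land.length : Int) ((land.headD []).length : Int)
        (2 * (((land.length : Int)).toNat * (((land.headD []).length : Int)).toNat) + 1)
        [(i, j)] (pvVSet v i j) 1 PySem.Set.empty).2.2 (U ∪ Mf) := by
  have hvs := pvVSet_spec land v U i j hsh hmk (pvMem_grid_of_one land (i, j) hs1)
  have hins : insert ((i, j) : Int × Int) U = U ∪ {(i, j)} := by
    rw [Finset.union_comm, Finset.insert_eq]
  have hmk1 : pvMark land (pvVSet v i j) (U ∪ {(i, j)}) := by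
    rw [← hins]
    exact hvs.2
  have hmeas : 2 * (pvGrid land \ (U ∪ {(i, j)})).card + ([(i, j)] : List (Int × Int)).length ≤
      2 * (((land.length : Int)).toNat * (((land.headD []).length : Int)).toNat) + 1 := by
    have h1 : (pvGrid land \ (U ∪ {(i, j)})).card ≤ (pvGrid land).card :=
      Finset.card_le_card (Finset.sdiff_subset)
    have h2 := pvGrid_card land
    simp only [List.length_cons, List.length_nil, Int.toNat_natCast]
    omega
  obtain ⟨Mf, hsubf, hconnf, hclf, hres1, hres2, hres3, hres4, hres5⟩ :=
    pvFlood_spec land U (i, j) hU hsU hs1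
      (2 * (((land.length : Int)).toNat * (((land.headD []).length : Int)).toNat) + 1)
      [(i, j)] (pvVSet v i j) 1 PySem.Set.empty {(i, j)}
      hvs.1 hmk1
      (by intro p hp; rw [List.mem_singleton] at hp; rw [hp]; exact Finset.mem_singleton_self _)
      (List.nodup_singleton _) (Finset.mem_singleton_self _)
      (by rw [Finset.card_singleton]; rfl)
      (by intro p hp; rw [Finset.mem_singleton] at hp; rw [hp]; exact Relation.ReflTransGen.refl)
      (by
        intro p hp hpq
        rw [Finset.mem_singleton] at hp
        exact absurd (by rw [hp]; exact List.mem_singleton_self _) hpq)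
      (List.nodup_nil)
      (by
        intro y
        constructor
        · intro h
          exact absurd h (List.not_mem_nil)
        · rintro ⟨x, hx1, hx2⟩
          rw [Finset.mem_singleton] at hx1
          exact absurd (by rw [hx1]; exact List.mem_singleton_self _) hx2)
      hmeas
  refine ⟨Mf, ?_, hres1, hres2, hres3, hres4, hres5⟩
  intro t
  constructor
  · exact hconnf t
  · intro ht
    induction ht with
    | refl => exact hsubf (Finset.mem_singleton_self _)
    | tail h' hadj ih => exact hclf _ ih _ hadj

theorem pvBump_comm (k : Int) (z : List Int) (a b : Int) :
    ((z.set a.toNat (z.getD a.toNat 0 + k)).set b.toNat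
      ((z.set a.toNat (z.getD a.toNat 0 + k)).getD b.toNat 0 + k)) =
    ((z.set b.toNat (z.getD b.toNat 0 + k)).set a.toNat
      ((z.set b.toNat (z.getD b.toNat 0 + k)).getD a.toNat 0 + k)) := by
  by_cases h : a.toNat = b.toNat
  · rw [h]
  · have hab : (z.set a.toNat (z.getD a.toNat 0 + k)).getD b.toNat 0 = z.getD b.toNat 0 := by
      rw [List.getD_eq_getElem?_getD (l := z.set a.toNat (z.getD a.toNat 0 + k)),
        List.getElem?_set, if_neg h, ← List.getD_eq_getElem?_getD]
    have hba : (z.set b.toNat (z.getD b.toNat 0 + k)).getD a.toNat 0 = z.getD a.toNat 0 := by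
      rw [List.getD_eq_getElem?_getD (l := z.set b.toNat (z.getD b.toNat 0 + k)),
        List.getElem?_set, if_neg (fun hh => h hh.symm), ← List.getD_eq_getElem?_getD]
    rw [hab, hba, List.set_comm _ _ h]

theorem pvBumpFold_eq (k : Int) (l1 l2 : List Int) (h1 : l1.Nodup) (h2 : l2.Nodup)
    (hmem : ∀ y, y ∈ l1 ↔ y ∈ l2) (oil : List Int) :
    l1.foldl (fun oil o => oil.set o.toNat (oil.getD o.toNat 0 + k)) oil =
    l2.foldl (fun oil o => oil.set o.toNat (oil.getD o.toNat 0 + k)) oil := by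
  refine List.Perm.foldl_eq' ((List.perm_ext_iff_of_nodup h1 h2).2 hmem) ?_ oil
  intro x _ y _ z
  exact pvBump_comm k z x y

theorem pvFoldRel {α β γ : Type} (R : β → γ → Prop) (f : β → α → β) (g : γ → α → γ)
    (l : List α) (hstep : ∀ a ∈ l, ∀ b c, R b c → R (f b a) (g c a)) :
    ∀ b c, R b c → R (l.foldl f b) (l.foldl g c) := by
  induction l with
  | nil => exact fun b c h => h
  | cons a l ih =>
    intro b c h
    simp only [List.foldl_cons]
    exact ih (fun a' ha' b' c' h' => hstep a' (List.mem_cons_of_mem _ ha') b' c' h')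
      _ _ (hstep a List.mem_cons_self b c h)

def pvRel (land : List (List Int)) (stA : List (List Int) × List Int)
    (stB : PySem.Set (Int × Int) × List Int) : Prop :=
  ∃ U : Finset (Int × Int),
    pvShape land stA.1 ∧ pvMark land stA.1 U ∧
    stB.1.Nodup ∧ (∀ p : Int × Int, p ∈ stB.1 ↔ p ∈ U) ∧
    pvClosed land U ∧ stA.2 = stB.2

def pvAStep (land : List (List Int)) (i : Int) (st : List (List Int) × List Int) (j : Int) :
    List (List Int) × List Int :=
  if pvCell st.1 i j = 0 ∧ pvCell land i j = 1 then
    let v1 := pvVSet st.1 i j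
    let res := pvFlood land (land.length : Int) ((land.headD []).length : Int)
      (2 * (((land.length : Int)).toNat * (((land.headD []).length : Int)).toNat) + 1)
      [(i, j)] v1 1 PySem.Set.empty
    (res.2.2, res.2.1.foldl (fun oil o => oil.set o.toNat (oil.getD o.toNat 0 + res.1)) st.2)
  else st

def pvBStep (land : List (List Int)) (i : Int) (st : PySem.Set (Int × Int) × List Int) (j : Int) :
    PySem.Set (Int × Int) × List Int :=
  if pvCell land i j = 1 ∧ (i, j) ∉ st.1 then
    let comp := pvSat land (land.length : Int) ((land.headD []).length : Int)
      (((land.length : Int)).toNat * (((land.headD []).length : Int)).toNat + 1)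
      (PySem.Set.ofList [(i, j)]) (PySem.Set.ofList [(i, j)])
    let size : Int := PySem.Set.len comp
    let cols := PySem.Set.ofList (comp.map Prod.snd)
    (PySem.Set.union st.1 comp,
     cols.foldl (fun oil y => oil.set y.toNat (oil.getD y.toNat 0 + size)) st.2)
  else st

theorem solution_eq (land : List (List Int)) :
    solution land = (PySem.List.max?
      ((PySem.List.pyRange 0 (land.length : Int) 1).foldl
        (fun st i => (PySem.List.pyRange 0 ((land.headD []).length : Int) 1).foldl
          (pvAStep land i) st)
        (List.replicate ((land.length : Int)).toNat
          (List.replicate (((land.headD []).length : Int)).toNat (0 : Int)),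
         List.replicate (((land.headD []).length : Int)).toNat (0 : Int))).2
      (fun x => x)).getD 0 := rfl

theorem solution_alt_eq (land : List (List Int)) :
    solution_alt land = (PySem.List.max?
      ((PySem.List.pyRange 0 (land.length : Int) 1).foldl
        (fun st i => (PySem.List.pyRange 0 ((land.headD []).length : Int) 1).foldl
          (pvBStep land i) st)
        (PySem.Set.empty,
         List.replicate (((land.headD []).length : Int)).toNat (0 : Int))).2
      (fun x => x)).getD 0 := rfl

theorem pvStep_rel (land : List (List Int)) (i j : Int)
    (hi : 0 ≤ i) (hi2 : i < (land.length : Int)) (hj : 0 ≤ j)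
    (hj2 : j < ((land.headD []).length : Int))
    (stA : List (List Int) × List Int) (stB : PySem.Set (Int × Int) × List Int)
    (h : pvRel land stA stB) : pvRel land (pvAStep land i stA j) (pvBStep land i stB j) := by
  obtain ⟨U, hsh, hmk, hnd, hmem, hcl, hoil⟩ := h
  have hg : (i, j) ∈ pvGrid land := (pvGrid_mem_iff land (i, j)).2 ⟨hi, hi2, hj, hj2⟩
  have hmkij := hmk (i, j) hg
  by_cases hU : (i, j) ∈ U
  · -- already visited in both programs: both guards fail
    rw [if_pos hU] at hmkij
    have hA : pvAStep land i stA j = stA := by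
      unfold pvAStep
      rw [if_neg]
      rintro ⟨h0, -⟩
      rw [hmkij] at h0
      norm_num at h0
    have hB : pvBStep land i stB j = stB := by
      unfold pvBStep
      rw [if_neg]
      rintro ⟨-, h0⟩
      exact h0 ((hmem (i, j)).2 hU)
    rw [hA, hB]
    exact ⟨U, hsh, hmk, hnd, hmem, hcl, hoil⟩
  · rw [if_neg hU] at hmkij
    by_cases hc : pvCell land i j = 1
    · -- a fresh component is discovered by both programs
      have hs1 : pvOne land (i, j) := ⟨hi, hi2, hj, hj2, hc⟩
      obtain ⟨Mf, hMf, hres1, hres2, hres3, hres4, hres5⟩ :=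
        pvFlood_top land U stA.1 i j hcl hU hs1 hsh hmk
      obtain ⟨hcompnd, hcomp⟩ := pvSat_top land (i, j) hs1
      set comp := pvSat land (land.length : Int) ((land.headD []).length : Int)
        (((land.length : Int)).toNat * (((land.headD []).length : Int)).toNat + 1)
        (PySem.Set.ofList [(i, j)]) (PySem.Set.ofList [(i, j)]) with hcompdef
      have hcompMf : ∀ p, p ∈ comp ↔ p ∈ Mf := fun p => by rw [hcomp p, ← hMf p]
      have htf : comp.toFinset = Mf := by
        ext p
        rw [List.mem_toFinset]
        exact hcompMf p
      have hsize : PySem.Set.len comp = (Mf.card : Int) := by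
        rw [← htf, List.toFinset_card_of_nodup hcompnd]
        simp [PySem.Set.len]
      have hA : pvAStep land i stA j =
          ((pvFlood land (land.length : Int) ((land.headD []).length : Int)
            (2 * (((land.length : Int)).toNat * (((land.headD []).length : Int)).toNat) + 1)
            [(i, j)] (pvVSet stA.1 i j) 1 PySem.Set.empty).2.2,
           (pvFlood land (land.length : Int) ((land.headD []).length : Int)
            (2 * (((land.length : Int)).toNat * (((land.headD []).length : Int)).toNat) + 1)
            [(i, j)] (pvVSet stA.1 i j) 1 PySem.Set.empty).2.1.foldl
              (fun oil o => oil.set o.toNat (oil.getD o.toNat 0 +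
                (pvFlood land (land.length : Int) ((land.headD []).length : Int)
                  (2 * (((land.length : Int)).toNat * (((land.headD []).length : Int)).toNat) + 1)
                  [(i, j)] (pvVSet stA.1 i j) 1 PySem.Set.empty).1)) stA.2) := by
        unfold pvAStep
        rw [if_pos ⟨hmkij, hc⟩]
      have hB : pvBStep land i stB j =
          (PySem.Set.union stB.1 comp,
           (PySem.Set.ofList (comp.map Prod.snd)).foldl
             (fun oil y => oil.set y.toNat (oil.getD y.toNat 0 + PySem.Set.len comp)) stB.2) := by
        unfold pvBStep
        rw [if_pos ⟨hc, fun hmemv => hU ((hmem (i, j)).1 hmemv)⟩]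
      rw [hA, hB]
      refine ⟨U ∪ Mf, hres4, hres5, PySem.Set.nodup_union _ _ hnd, ?_, ?_, ?_⟩
      · intro p
        rw [PySem.Set.mem_union, Finset.mem_union, hmem p, hcompMf p]
      · intro p hp t hadj
        rcases Finset.mem_union.1 hp with hpU | hpM
        · exact Finset.mem_union_left _ (hcl p hpU t hadj)
        · refine Finset.mem_union_right _ ?_
          rw [hMf t]
          exact Relation.ReflTransGen.tail ((hMf p).1 hpM) hadj
      · simp only []
        rw [hoil, hres1, hsize]
        refine pvBumpFold_eq _ _ _ hres2 (PySem.Set.nodup_ofList _) ?_ stB.2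
        intro o
        rw [hres3 o, PySem.Set.mem_ofList, List.mem_map]
        constructor
        · rintro ⟨x, hx⟩
          exact ⟨(x, o), (hcompMf (x, o)).2 hx, rfl⟩
        · rintro ⟨p, hp, rfl⟩
          exact ⟨p.1, (hcompMf (p.1, p.2)).1 (by simpa using hp)⟩
    · -- not an oil cell: both guards fail
      have hA : pvAStep land i stA j = stA := by
        unfold pvAStep
        rw [if_neg]
        rintro ⟨-, h0⟩
        exact hc h0
      have hB : pvBStep land i stB j = stB := by
        unfold pvBStep
        rw [if_neg]
        rintro ⟨h0, -⟩
        exact hc h0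
      rw [hA, hB]
      exact ⟨U, hsh, hmk, hnd, hmem, hcl, hoil⟩

theorem pvMain (land : List (List Int)) : solution land = solution_alt land := by
  rw [solution_eq, solution_alt_eq]
  have hinit : pvRel land
      (List.replicate ((land.length : Int)).toNat
        (List.replicate (((land.headD []).length : Int)).toNat (0 : Int)),
       List.replicate (((land.headD []).length : Int)).toNat (0 : Int))
      (PySem.Set.empty,
       List.replicate (((land.headD []).length : Int)).toNat (0 : Int)) := by
    refine ⟨∅, pvShape_v0 land, pvMark_v0 land, List.nodup_nil, ?_, ?_, rfl⟩
    · intro p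
      simp [PySem.Set.empty]
    · intro p hp
      exact absurd hp (Finset.notMem_empty p)
  have hfold := pvFoldRel (pvRel land)
    (fun st i => (PySem.List.pyRange 0 ((land.headD []).length : Int) 1).foldl
      (pvAStep land i) st)
    (fun st i => (PySem.List.pyRange 0 ((land.headD []).length : Int) 1).foldl
      (pvBStep land i) st)
    (PySem.List.pyRange 0 (land.length : Int) 1)
    (fun a ha stA stB hrel => pvFoldRel (pvRel land) (pvAStep land a) (pvBStep land a)
      (PySem.List.pyRange 0 ((land.headD []).length : Int) 1)
      (fun b hb stA' stB' hrel' => pvStep_rel land a b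
        ((PySem.List.mem_pyRange_one.1 ha).1)
        ((PySem.List.mem_pyRange_one.1 ha).2)
        ((PySem.List.mem_pyRange_one.1 hb).1)
        ((PySem.List.mem_pyRange_one.1 hb).2)
        stA' stB' hrel') stA stB hrel)
    _ _ hinit
  obtain ⟨U, _, _, _, _, _, hoil⟩ := hfold
  rw [hoil]

-- ===== VERDICT (by name: the statement is the Claim_ definition above) =====
theorem solution_spec : Claim_equal_solution := by
  intro land _ _
  exact pvMain land
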